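-- pv_equiv track=rewrite | github.com/wikilife-org/wikilife_biz | wikilife_biz/services/user/timeline_service.py | _process_drug_daily_stat
-- ===== SOURCE A (Python) =====
-- def _process_drug_daily_stat(drug_reports):
--     drug_dict = {}
--
--     if drug_reports:
--         log_count = 0
--         aux_date = drug_reports[0]["date"]
--         drug_dict[aux_date] = {}
--
--         for report in drug_reports:
--
--             if report["date"] != aux_date:
--                 drug_dict[aux_date]["log_count"] = log_count
--                 aux_date = report["date"]
--
--                 log_count = 0
--                 drug_dict[aux_date] = {}
--
--             log_count = log_count + 1
--
--         drug_dict[aux_date]["log_count"] = log_count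
--     return drug_dict
-- ===== SOURCE B (Python) =====
-- def _process_drug_daily_stat(drug_reports):
--     # Phase 1: split the report list into maximal runs of consecutive equal dates.
--     runs = []
--     reports = drug_reports
--     while reports:
--         date = reports[0]["date"]
--         i = 0
--         while i < len(reports) - 1 and reports[i + 1]["date"] == date:
--             i += 1
--         runs.append((date, 1 + i))
--         reports = reports[1 + i:]
--     # Phase 2: one dict entry per run; a repeated date overwrites (keeps first position),
--     # exactly as Python dict assignment does.
--     out = {}
--     for date, count in runs:
--         out[date] = {"log_count": count}
--     return out
-- ===== Notes on version B (the rewrite author's own statement) =====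
-- stated objective: alternative
-- what changed: B replaces A's single pass with mutable aux_date/log_count state and delayed flushes by a two-phase algorithm: first split the list into maximal runs of consecutive equal dates with a two-pointer scan, then build the dict with one assignment per run (later runs of a repeated date overwrite, as in A).
import Mathlib
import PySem

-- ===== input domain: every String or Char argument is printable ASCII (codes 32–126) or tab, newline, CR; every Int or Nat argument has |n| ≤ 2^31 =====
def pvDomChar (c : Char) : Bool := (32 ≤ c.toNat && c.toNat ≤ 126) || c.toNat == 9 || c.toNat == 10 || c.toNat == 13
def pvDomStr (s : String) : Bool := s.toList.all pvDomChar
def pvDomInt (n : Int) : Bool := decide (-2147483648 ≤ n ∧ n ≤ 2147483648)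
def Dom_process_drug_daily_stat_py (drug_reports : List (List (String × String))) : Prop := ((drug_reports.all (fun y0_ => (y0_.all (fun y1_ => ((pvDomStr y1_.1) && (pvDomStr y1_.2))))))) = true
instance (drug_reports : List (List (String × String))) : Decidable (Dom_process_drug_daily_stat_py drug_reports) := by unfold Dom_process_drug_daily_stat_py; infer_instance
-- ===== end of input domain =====

-- B computes the same per-consecutive-run log counts by a two-phase run-split instead of A's
-- stateful single pass; equivalence is proved on inputs where every report carries a "date" key.

-- ===== PORT A =====
-- report["date"]: first-match lookup in the report dict; exact under Pre_ (key present).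
def pvDateOf (report : List (String × String)) : String :=
  (PySem.Dict.ofList report).getD "date" ""

-- drug_dict[aux_date]["log_count"] = log_count  (fetch inner dict, set key, store back)
def pvFlushA (d : PySem.Dict String (PySem.Dict String Int)) (lc : Int) (aux : String) :
    PySem.Dict String (PySem.Dict String Int) :=
  d.insert aux ((d.getD aux PySem.Dict.empty).insert "log_count" lc)

-- the body of A's for-loop over (drug_dict, log_count, aux_date)
def pvStepA (st : PySem.Dict String (PySem.Dict String Int) × Int × String)
    (report : List (String × String)) :
    PySem.Dict String (PySem.Dict String Int) × Int × String :=
  let (d, lc, aux) := st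
  let rd := pvDateOf report
  if rd ≠ aux then
    (((pvFlushA d lc aux).insert rd PySem.Dict.empty), (1 : Int), rd)
  else (d, lc + 1, aux)

def process_drug_daily_stat_py (drug_reports : List (List (String × String))) :
    List (String × List (String × Int)) :=
  match drug_reports with
  | [] => []
  | r0 :: _ =>
    let aux0 := pvDateOf r0
    let st := drug_reports.foldl pvStepA
      (PySem.Dict.insert PySem.Dict.empty aux0 PySem.Dict.empty, (0 : Int), aux0)
    (pvFlushA st.1 st.2.1 st.2.2).items.map (fun p => (p.1, p.2.items))

-- ===== PORT B =====
-- inner while: number of further reports (after the head) continuing the head's run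
def pvRunLen (date : String) : List (List (String × String)) → Nat
  | [] => 0
  | r :: rest => if pvDateOf r = date then 1 + pvRunLen date rest else 0

-- outer while: the list of (date, run length) for maximal consecutive runs
def pvRuns : List (List (String × String)) → List (String × Int)
  | [] => []
  | r :: rest =>
    let date := pvDateOf r
    let i := pvRunLen date rest
    (date, (1 : Int) + (i : Int)) :: pvRuns (rest.drop i)
termination_by l => l.length
decreasing_by simp

def process_drug_daily_stat_py_alt (drug_reports : List (List (String × String))) :
    List (String × List (String × Int)) :=
  ((pvRuns drug_reports).foldl
      (fun (out : PySem.Dict String (PySem.Dict String Int)) p =>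
        out.insert p.1 (PySem.Dict.insert PySem.Dict.empty "log_count" p.2))
      PySem.Dict.empty).items.map (fun p => (p.1, p.2.items))

-- ===== PRECONDITION & SPEC =====
-- Pre_ excludes reports missing a "date" key, on which Python's report["date"] raises KeyError.
def Pre_process_drug_daily_stat_py (drug_reports : List (List (String × String))) : Prop :=
  ∀ r ∈ drug_reports, "date" ∈ r.map Prod.fst
instance (drug_reports : List (List (String × String))) : Decidable (Pre_process_drug_daily_stat_py drug_reports) := by unfold Pre_process_drug_daily_stat_py; infer_instance
def pvWitness_process_drug_daily_stat_py : (List (List (String × String))) :=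
  [[("date", "2020-01-01"), ("id", "1")], [("date", "2020-01-02")]]
def Spec_process_drug_daily_stat_py (drug_reports : List (List (String × String))) (out : List (String × List (String × Int))) : Prop := out = process_drug_daily_stat_py_alt drug_reports
instance (drug_reports : List (List (String × String))) (out : List (String × List (String × Int))) : Decidable (Spec_process_drug_daily_stat_py drug_reports out) := by unfold Spec_process_drug_daily_stat_py; infer_instance

-- ===== CLAIM (what is proved, stated in full; the proofs are below) =====
def Claim_equal_process_drug_daily_stat_py : Prop := ∀ (drug_reports : List (List (String × String))), Dom_process_drug_daily_stat_py drug_reports → Pre_process_drug_daily_stat_py drug_reports → Spec_process_drug_daily_stat_py drug_reports (process_drug_daily_stat_py drug_reports)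

-- ===== LEMMAS AND PROOFS =====

-- A's loop, rewritten as a recursion that flushes at the end (proof-only helper).
def pvProcA (d : PySem.Dict String (PySem.Dict String Int)) (lc : Int) (aux : String) :
    List (List (String × String)) → PySem.Dict String (PySem.Dict String Int)
  | [] => pvFlushA d lc aux
  | r :: rest =>
    if pvDateOf r ≠ aux then
      pvProcA ((pvFlushA d lc aux).insert (pvDateOf r) PySem.Dict.empty) 1 (pvDateOf r) rest
    else pvProcA d (lc + 1) aux rest

def pvStep (out : PySem.Dict String (PySem.Dict String Int)) (p : String × Int) :
    PySem.Dict String (PySem.Dict String Int) :=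
  out.insert p.1 (PySem.Dict.insert PySem.Dict.empty "log_count" p.2)

def pvAuxRuns (aux : String) (lc : Int) (l : List (List (String × String))) :
    List (String × Int) :=
  (aux, lc + (pvRunLen aux l : Int)) :: pvRuns (l.drop (pvRunLen aux l))

theorem pvFoldl_eq_procA (l : List (List (String × String)))
    (d : PySem.Dict String (PySem.Dict String Int)) (lc : Int) (aux : String) :
    (let st := l.foldl pvStepA (d, lc, aux); pvFlushA st.1 st.2.1 st.2.2) =
      pvProcA d lc aux l := by
  induction l generalizing d lc aux with
  | nil => rfl
  | cons r rest ih =>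
    simp only [List.foldl_cons, pvStepA, pvProcA]
    split_ifs with h
    · exact ih _ _ _
    · exact ih _ _ _

theorem pvRuns_nil : pvRuns [] = [] := by rw [pvRuns.eq_def]

theorem pvRuns_cons (r : List (String × String)) (rest : List (List (String × String))) :
    pvRuns (r :: rest) =
      (pvDateOf r, (1 : Int) + (pvRunLen (pvDateOf r) rest : Int)) ::
        pvRuns (rest.drop (pvRunLen (pvDateOf r) rest)) := by rw [pvRuns.eq_def]

theorem pvProcA_insert (l : List (List (String × String)))
    (d : PySem.Dict String (PySem.Dict String Int)) (lc : Int) (aux : String) :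
    pvProcA (d.insert aux PySem.Dict.empty) lc aux l =
      (pvAuxRuns aux lc l).foldl pvStep d := by
  induction l generalizing d lc aux with
  | nil =>
    simp [pvProcA, pvAuxRuns, pvRunLen, pvRuns_nil, pvStep, pvFlushA,
      PySem.Dict.getD_insert_self, PySem.Dict.insert_insert_self]
  | cons r rest ih =>
    by_cases h : pvDateOf r = aux
    · simp only [pvProcA, h, ne_eq, not_true_eq_false, if_false]
      rw [ih d (lc + 1) aux]
      have hruns : pvAuxRuns aux lc (r :: rest) = pvAuxRuns aux (lc + 1) rest := by
        simp [pvAuxRuns, pvRunLen, h]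
        constructor
        · ring
        · rw [Nat.add_comm 1 (pvRunLen aux rest), List.drop_succ_cons]
      rw [hruns]
    · have hflush : pvFlushA (d.insert aux PySem.Dict.empty) lc aux =
          d.insert aux (PySem.Dict.insert PySem.Dict.empty "log_count" lc) := by
        simp [pvFlushA, PySem.Dict.getD_insert_self, PySem.Dict.insert_insert_self]
      simp only [pvProcA, h, ne_eq, not_false_eq_true, if_true, hflush]
      rw [ih (d.insert aux (PySem.Dict.insert PySem.Dict.empty "log_count" lc)) 1 (pvDateOf r)]
      simp only [pvAuxRuns]
      simp [pvRunLen, h]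
      rw [pvRuns_cons r rest]
      simp [pvStep]

theorem pvA_eq_B (drug_reports : List (List (String × String))) :
    process_drug_daily_stat_py drug_reports = process_drug_daily_stat_py_alt drug_reports := by
  cases drug_reports with
  | nil =>
    simp [process_drug_daily_stat_py, process_drug_daily_stat_py_alt, pvRuns_nil,
      PySem.Dict.empty]
  | cons r0 rest =>
    simp only [process_drug_daily_stat_py, process_drug_daily_stat_py_alt]
    rw [pvFoldl_eq_procA, pvProcA_insert]
    have hruns : pvAuxRuns (pvDateOf r0) 0 (r0 :: rest) = pvRuns (r0 :: rest) := by
      rw [pvRuns_cons r0 rest]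
      simp [pvAuxRuns, pvRunLen]
      rw [Nat.add_comm 1 (pvRunLen (pvDateOf r0) rest), List.drop_succ_cons]
    rw [hruns]
    rfl

-- ===== VERDICT (by name: the statement is the Claim_ definition above) =====
theorem process_drug_daily_stat_py_spec : Claim_equal_process_drug_daily_stat_py := by
  intro drug_reports _ _
  unfold Spec_process_drug_daily_stat_py
  exact pvA_eq_B drug_reports
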